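-- pv_equiv track=rewrite | github.com/romulobrito/CS-ML | real_well_f03.py | normalize_channels
-- ===== SOURCE A (Python) =====
-- from typing import Dict, List, Tuple
--
-- _VALID_CHANNELS = ("ac", "gr")
--
-- def normalize_channels(channels: Tuple[str, ...]) -> Tuple[str, ...]:
--     """Return a validated, order-preserving tuple of unique channel names."""
--     seen: List[str] = []
--     for c in channels:
--         key = c.strip().lower()
--         if key not in _VALID_CHANNELS:
--             raise ValueError(
--                 "Unknown channel '{}'. Valid channels: {}.".format(c, _VALID_CHANNELS)
--             )
--         if key not in seen:
--             seen.append(key)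
--     if not seen:
--         raise ValueError("At least one channel must be provided.")
--     return tuple(seen)
-- ===== SOURCE B (Python) =====
-- from typing import Dict, List, Tuple
--
-- _VALID_CHANNELS = ("ac", "gr")
--
-- def normalize_channels(channels):
--     """Validate/normalize every channel, then order the valid channel names
--     that occur by their first occurrence index (no seen-accumulator)."""
--     keys = []
--     for c in channels:
--         key = c.strip().lower()
--         if key not in _VALID_CHANNELS:
--             raise ValueError(
--                 "Unknown channel '{}'. Valid channels: {}.".format(c, _VALID_CHANNELS)
--             )
--         keys.append(key)
--     firsts = sorted((keys.index(v), v) for v in _VALID_CHANNELS if v in keys)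
--     if not firsts:
--         raise ValueError("At least one channel must be provided.")
--     return tuple(v for _, v in firsts)
-- ===== Notes on version B (the rewrite author's own statement) =====
-- stated objective: alternative
-- what changed: B validates/normalizes all channels first, then instead of A's seen-accumulator dedup loop it computes, for each of the two valid channel names that occurs, its first-occurrence index with keys.index, and sorts those (index, name) pairs to produce the output order.
import Mathlib
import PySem

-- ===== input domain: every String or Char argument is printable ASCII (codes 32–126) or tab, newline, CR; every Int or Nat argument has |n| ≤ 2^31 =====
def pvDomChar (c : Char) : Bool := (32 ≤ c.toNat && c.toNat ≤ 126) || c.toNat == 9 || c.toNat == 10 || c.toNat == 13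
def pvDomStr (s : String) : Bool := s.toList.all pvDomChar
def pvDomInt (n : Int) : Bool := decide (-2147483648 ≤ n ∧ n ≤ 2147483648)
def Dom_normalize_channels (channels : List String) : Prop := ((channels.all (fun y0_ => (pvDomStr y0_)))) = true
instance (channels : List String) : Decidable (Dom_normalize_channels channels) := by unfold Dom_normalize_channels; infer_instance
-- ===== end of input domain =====

-- B replaces A's seen-accumulator dedup loop by a different algorithm: validate/normalize
-- all channels, then sort the valid channel names that occur by their first-occurrence
-- index (alternative decomposition, same return value on Pre_).

-- key = c.strip().lower()
def pvKey (c : String) : String := PySem.Str.lower (PySem.Str.strip c)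

-- key in _VALID_CHANNELS
def pvValid (k : String) : Bool := k == "ac" || k == "gr"

-- ===== PORT A =====
-- one loop: validate (raise path dead under Pre_) and accumulate unseen keys
def normalize_channels (channels : List String) : List String :=
  channels.foldl
    (fun seen c =>
      let key := pvKey c
      if !(pvValid key) then seen          -- raise ValueError: excluded by Pre_
      else if seen.contains key then seen
      else seen ++ [key])
    []

-- ===== PORT B =====
-- pass 1: keys = normalized channels (the raise path is dead under Pre_);
-- pass 2: firsts = sorted((keys.index(v), v) for v in _VALID_CHANNELS if v in keys);
--         (keys.index(v) is guarded by 'v in keys', so getD 0 is never the default)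
-- return tuple(v for _, v in firsts)   (empty-result raise is dead under Pre_)
def normalize_channels_alt (channels : List String) : List String :=
  let keys := channels.map pvKey
  let firsts := (["ac", "gr"].filter (fun v => keys.contains v)).map
      (fun v => ((((PySem.List.index? keys v).getD 0 : Nat) : Int), v))
  (PySem.List.sorted2 firsts (fun p => p.1) (fun p => p.2)).map (fun p => p.2)

-- ===== PRECONDITION & SPEC =====
-- Pre_ excludes exactly the inputs where A raises ValueError: a channel whose
-- stripped/lowered form is not "ac"/"gr", or an empty channel list.
def Pre_normalize_channels (channels : List String) : Prop :=
  channels ≠ [] ∧ channels.all (fun c => pvValid (pvKey c)) = true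
instance (channels : List String) : Decidable (Pre_normalize_channels channels) := by
  unfold Pre_normalize_channels; infer_instance

def pvWitness_normalize_channels : List String := [" AC ", "gr", "Gr"]

def Spec_normalize_channels (channels : List String) (out : List String) : Prop := out = normalize_channels_alt channels
instance (channels : List String) (out : List String) : Decidable (Spec_normalize_channels channels out) := by unfold Spec_normalize_channels; infer_instance

-- ===== CLAIM =====
def Claim_equal_normalize_channels : Prop := ∀ (channels : List String), Dom_normalize_channels channels → Pre_normalize_channels channels → Spec_normalize_channels channels (normalize_channels channels)

-- ===== LEMMAS AND PROOFS =====
-- canonical value of both sides, by the first-occurrence indices of "ac" and "gr"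
def pvSpec : Option Nat → Option Nat → List String
  | none, none => []
  | some _, none => ["ac"]
  | none, some _ => ["gr"]
  | some i, some j => if i < j then ["ac", "gr"] else ["gr", "ac"]

-- A's fold, on a list of valid keys, is the ordered dedup of the mapped keys.
lemma fold_eq_dedup (l : List String) (acc : List String)
    (h : ∀ c ∈ l, pvValid (pvKey c) = true) :
    l.foldl
      (fun seen c =>
        let key := pvKey c
        if !(pvValid key) then seen
        else if seen.contains key then seen
        else seen ++ [key]) acc
    = (l.map pvKey).foldl PySem.Set.add acc := by
  induction l generalizing acc with
  | nil => simp only [List.foldl_nil, List.map_nil]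
  | cons c cs ih =>
    have hc : pvValid (pvKey c) = true := h c (List.mem_cons_self)
    rw [List.map_cons, List.foldl_cons, List.foldl_cons]
    have hstep : (if !(pvValid (pvKey c)) then acc
        else if acc.contains (pvKey c) then acc else acc ++ [pvKey c])
        = PySem.Set.add acc (pvKey c) := by
      rw [hc]; rfl
    rw [hstep]
    exact ih _ (fun x hx => h x (List.mem_cons_of_mem _ hx))

lemma dedup_char (keys : List String)
    (h : ∀ x ∈ keys, x = "ac" ∨ x = "gr") :
    PySem.List.dedup keys
      = pvSpec (PySem.List.index? keys "ac") (PySem.List.index? keys "gr") := by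
  induction keys with
  | nil => rfl
  | cons x xs ih =>
    have hxs : ∀ y ∈ xs, y = "ac" ∨ y = "gr" :=
      fun y hy => h y (List.mem_cons_of_mem _ hy)
    have ih' := ih hxs
    rcases h x List.mem_cons_self with rfl | rfl
    · rw [PySem.List.index?_cons_self,
          PySem.List.index?_cons_of_ne _ (by decide : ("ac" : String) ≠ "gr")]
      rw [PySem.List.dedup_eq_ofList, PySem.Set.ofList_cons,
          ← PySem.List.dedup_eq_ofList, ih']
      cases hg : PySem.List.index? xs "gr" with
      | none =>
        cases ha : PySem.List.index? xs "ac" <;> simp [pvSpec, PySem.Set.discard]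
      | some j =>
        cases ha : PySem.List.index? xs "ac" with
        | none => simp [pvSpec, PySem.Set.discard]
        | some i =>
          by_cases hij : i < j <;>
            simp [pvSpec, hij, PySem.Set.discard]
    · rw [PySem.List.index?_cons_self,
          PySem.List.index?_cons_of_ne _ (by decide : ("gr" : String) ≠ "ac")]
      rw [PySem.List.dedup_eq_ofList, PySem.Set.ofList_cons,
          ← PySem.List.dedup_eq_ofList, ih']
      cases ha : PySem.List.index? xs "ac" with
      | none =>
        cases hg : PySem.List.index? xs "gr" <;> simp [pvSpec, PySem.Set.discard]
      | some i =>
        cases hg : PySem.List.index? xs "gr" with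
        | none => simp [pvSpec, PySem.Set.discard]
        | some j =>
          by_cases hij : i < j <;>
            simp [pvSpec, hij, PySem.Set.discard]

set_option maxRecDepth 4000 in
lemma sorted2_pair (i j : Int) :
    PySem.List.sorted2 [(i, "ac"), (j, "gr")] (fun p => p.1) (fun p => p.2)
      = if i ≤ j then [(i, "ac"), (j, "gr")] else [(j, "gr"), (i, "ac")] := by
  have hlt : ¬(['g','r'] < ['a','c']) := by decide
  simp only [PySem.List.sorted2, List.foldl, PySem.List.insertBy]
  norm_num
  split_ifs with h1 h2 h3
  · rcases h1 with hh | hh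
    · omega
    · exact absurd hh.2 hlt
  · rfl
  · rfl
  · exfalso; exact h1 (Or.inl (by omega))

lemma alt_eq_spec (keys : List String) :
    (PySem.List.sorted2
        ((["ac", "gr"].filter (fun v => keys.contains v)).map
          (fun v => ((((PySem.List.index? keys v).getD 0 : Nat) : Int), v)))
        (fun p => p.1) (fun p => p.2)).map (fun p => p.2)
      = pvSpec (PySem.List.index? keys "ac") (PySem.List.index? keys "gr") := by
  cases ha : PySem.List.index? keys "ac" with
  | none =>
    have hna : "ac" ∉ keys := (PySem.List.index?_eq_none_iff _ _).mp ha
    cases hg : PySem.List.index? keys "gr" with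
    | none =>
      have hng : "gr" ∉ keys := (PySem.List.index?_eq_none_iff _ _).mp hg
      have hfil : ["ac", "gr"].filter (fun v => keys.contains v) = [] := by
        simp [List.filter, hna, hng]
      rw [hfil]; rfl
    | some j =>
      have hmg : "gr" ∈ keys := (PySem.List.index?_isSome_iff keys "gr").mp (by rw [hg]; rfl)
      have hfil : ["ac", "gr"].filter (fun v => keys.contains v) = ["gr"] := by
        simp [List.filter, hna, hmg]
      rw [hfil]
      simp only [List.map_cons, List.map_nil]
      rw [hg]; rfl
  | some i =>
    have hma : "ac" ∈ keys := (PySem.List.index?_isSome_iff keys "ac").mp (by rw [ha]; rfl)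
    cases hg : PySem.List.index? keys "gr" with
    | none =>
      have hng : "gr" ∉ keys := (PySem.List.index?_eq_none_iff _ _).mp hg
      have hfil : ["ac", "gr"].filter (fun v => keys.contains v) = ["ac"] := by
        simp [List.filter, hma, hng]
      rw [hfil]
      simp only [List.map_cons, List.map_nil]
      rw [ha]; rfl
    | some j =>
      have hmg : "gr" ∈ keys := (PySem.List.index?_isSome_iff keys "gr").mp (by rw [hg]; rfl)
      have hij : i ≠ j := by
        obtain ⟨hi, hvi, -⟩ := PySem.List.getElem_of_index?_eq_some ha
        obtain ⟨hj, hvj, -⟩ := PySem.List.getElem_of_index?_eq_some hg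
        intro hEq
        subst hEq
        have hsame : keys[i]'hi = keys[i]'hj := rfl
        exact absurd (hvi.symm.trans (hsame.trans hvj)) (by decide)
      have hfil : ["ac", "gr"].filter (fun v => keys.contains v) = ["ac", "gr"] := by
        simp [List.filter, hma, hmg]
      rw [hfil]
      simp only [List.map_cons, List.map_nil]
      rw [ha, hg]
      simp only [Option.getD_some]
      rw [sorted2_pair]
      by_cases hlt : i < j
      · rw [if_pos (by exact_mod_cast Nat.le_of_lt hlt)]
        simp [pvSpec, hlt]
      · rw [if_neg (by
          intro hle
          exact hlt (lt_of_le_of_ne (by exact_mod_cast hle) hij))]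
        simp [pvSpec, hlt]

-- ===== VERDICT =====
theorem normalize_channels_spec : Claim_equal_normalize_channels := by
  intro channels _ hpre
  unfold Spec_normalize_channels normalize_channels normalize_channels_alt
  rw [fold_eq_dedup channels [] (by simpa [List.all_eq_true] using hpre.2)]
  have hall : ∀ x ∈ channels.map pvKey, x = "ac" ∨ x = "gr" := by
    intro x hx
    obtain ⟨c, hc, rfl⟩ := List.mem_map.mp hx
    have := (List.all_eq_true.mp hpre.2) c hc
    have hv : pvValid (pvKey c) = true := by simpa using this
    exact (by simpa [pvValid] using hv : pvKey c = "ac" ∨ pvKey c = "gr")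
  calc (channels.map pvKey).foldl PySem.Set.add []
      = PySem.List.dedup (channels.map pvKey) := by
        rw [PySem.List.dedup_eq_ofList, PySem.Set.ofList_eq_foldl]
    _ = pvSpec (PySem.List.index? (channels.map pvKey) "ac")
          (PySem.List.index? (channels.map pvKey) "gr") :=
        dedup_char _ hall
    _ = _ := (alt_eq_spec (channels.map pvKey)).symm
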